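-- pv_equiv track=rewrite | github.com/BlazejNowicki/ASD | dp_greedy/z8/zad1o.py | keep_connected
-- ===== SOURCE A (Python) =====
-- def DFS(G, visited, order, time, u):
--     visited[u] = True
--     for v in range(len(G)):
--         if G[u][v] == 1 and not visited[v]:
--             time = DFS(G, visited, order, time, v)
--     order[u] = time
--     time += 1
--     return time
--
-- def keep_connected(G):
--     n = len(G)
--     visited = [False]*n
--     order = [-1]*n
--     time = 0
--
--     for i in range(n):
--         if not visited[i]:
--             time = DFS(G, visited, order, time, i)
--     return order
-- ===== SOURCE B (Python) =====
-- def keep_connected(G):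
--     n = len(G)
--     seen = set()
--     post = []  # nodes in finishing order
--     for root in range(n):
--         if root in seen:
--             continue
--         seen.add(root)
--         path = [(root, 0)]  # resumption frames: (node, next neighbour index to try)
--         while path:
--             u, j = path.pop()
--             while j < n and not (G[u][j] == 1 and j not in seen):
--                 j += 1
--             if j < n:
--                 path.append((u, j + 1))
--                 seen.add(j)
--                 path.append((j, 0))
--             else:
--                 post.append(u)
--     idx = {u: t for t, u in enumerate(post)}
--     return [idx.get(u, -1) for u in range(n)]
-- ===== Notes on version B (the rewrite author's own statement) =====
-- stated objective: alternative
-- what changed: A's recursive DFS that mutates the order array and threads a time counter is replaced by an iterative DFS over a stack of resumption frames (node, next-neighbour-index) that only records the postorder sequence of finished nodes; the order array is assembled afterwards from an index dictionary built over that sequence.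
import Mathlib
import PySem

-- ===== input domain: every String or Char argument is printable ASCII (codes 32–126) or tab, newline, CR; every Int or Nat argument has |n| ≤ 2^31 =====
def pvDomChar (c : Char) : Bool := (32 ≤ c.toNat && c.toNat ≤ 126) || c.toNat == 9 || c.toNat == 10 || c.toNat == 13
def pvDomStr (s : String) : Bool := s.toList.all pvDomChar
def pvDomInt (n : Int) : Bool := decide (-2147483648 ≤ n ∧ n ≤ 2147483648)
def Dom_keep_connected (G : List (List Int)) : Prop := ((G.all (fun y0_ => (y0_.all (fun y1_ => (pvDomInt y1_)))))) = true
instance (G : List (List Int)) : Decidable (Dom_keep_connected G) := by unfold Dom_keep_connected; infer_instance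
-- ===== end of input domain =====

-- B replaces A's recursive DFS (which mutates the order array and a time counter) by an iterative DFS over a stack of
-- resumption frames that records only the postorder sequence; the order array is then
-- assembled from an index dictionary over that sequence. Objective: alternative, same cost.

-- ===== PORT A =====
-- State is (visited, order, time) as in the Python. Recursion is guarded by fuel
-- (a totality guard only: the recursion depth is bounded by the number of unvisited
-- nodes, and keep_connected supplies fuel n which always suffices).
-- Row/entry access uses getD; under Pre_ every index read by the Python is in range,
-- so getD is exact there.
def dfsA (G : List (List Int)) : Nat → List Bool × List Int × Int → Nat → List Bool × List Int × Int
  | 0, s, _ => s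
  | f+1, s, u =>
    let s2 := (List.range G.length).foldl
      (fun t v => if (G.getD u []).getD v 0 = 1 ∧ t.1.getD v false = false then dfsA G f t v else t)
      (s.1.set u true, s.2.1, s.2.2)
    (s2.1, s2.2.1.set u s2.2.2, s2.2.2 + 1)

def keep_connected (G : List (List Int)) : List Int :=
  let n := G.length
  let s := (List.range n).foldl
    (fun s i => if s.1.getD i false = false then dfsA G n s i else s)
    (List.replicate n false, List.replicate n ((-1 : Int)), (0 : Int))
  s.2.1

-- ===== PORT B =====
-- Source B's inner `while j < n and not (G[u][j] == 1 and j not in seen): j += 1` scan;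
-- fuel n - j is exact (the loop advances j by one until j = n).
def scanB (G : List (List Int)) (seen : PySem.Set Nat) (u : Nat) : Nat → Nat → Nat
  | 0, j => j
  | f+1, j =>
    if j < G.length ∧ ¬((G.getD u []).getD j 0 = 1 ∧ j ∉ seen) then scanB G seen u f (j+1)
    else j

-- Source B's `while path:` loop. A frame (u, j) resumes u's neighbour scan at index j; the top
-- of Source B's path list is the head here. Fuel is a totality guard only: each step pops a
-- frame or marks a new node, so (n+1)^2 always suffices.
def runB (G : List (List Int)) : Nat → PySem.Set Nat × List Nat → List (Nat × Nat) → PySem.Set Nat × List Nat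
  | 0, s, _ => s
  | _+1, s, [] => s
  | f+1, s, (u, j) :: k =>
    let j' := scanB G s.1 u (G.length - j) j
    if j' < G.length then
      runB G f (PySem.Set.add s.1 j', s.2) ((j', 0) :: (u, j' + 1) :: k)
    else
      runB G f (s.1, s.2 ++ [u]) k

def keep_connected_alt (G : List (List Int)) : List Int :=
  let n := G.length
  let s := (List.range n).foldl
    (fun s root =>
      if root ∈ s.1 then s
      else runB G ((n + 1) * (n + 1)) (PySem.Set.add s.1 root, s.2) [(root, 0)])
    (PySem.Set.empty, ([] : List Nat))
  let idx : PySem.Dict Nat Int :=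
    (PySem.List.enumerate s.2).foldl (fun d p => d.insert p.2 p.1) PySem.Dict.empty
  (List.range n).map (fun u => idx.getD u (-1))

-- ===== PRECONDITION & SPEC =====
-- Pre_: every row must have at least n = len(G) entries: the Python A reads G[u][v] for all
-- v in range(n) on every u (every node is eventually visited), so a shorter row raises
-- IndexError (and B's scan reads the same entries). Pre_ excludes exactly those raising inputs.
def Pre_keep_connected (G : List (List Int)) : Prop := ∀ row ∈ G, G.length ≤ row.length
instance (G : List (List Int)) : Decidable (Pre_keep_connected G) := by unfold Pre_keep_connected; infer_instance

def pvWitness_keep_connected : List (List Int) := [[0, 1, 0], [0, 0, 1], [1, 0, 0]]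

def Spec_keep_connected (G : List (List Int)) (out : List Int) : Prop := out = keep_connected_alt G
instance (G : List (List Int)) (out : List Int) : Decidable (Spec_keep_connected G out) := by unfold Spec_keep_connected; infer_instance

-- ===== CLAIM (what is proved, stated in full; the proofs are below) =====
def Claim_equal_keep_connected : Prop := ∀ (G : List (List Int)), Dom_keep_connected G → Pre_keep_connected G → Spec_keep_connected G (keep_connected G)

-- ===== LEMMAS AND PROOFS =====

-- `visited` lists ordered pointwise (marks only ever get added), with equal length.
def Vle (a b : List Bool) : Prop := a.length = b.length ∧ ∀ i, a.getD i false = true → b.getD i false = true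

-- number of unvisited nodes on A's side
def cF (vis : List Bool) : Nat := vis.count false

-- coupling of A's visited list with B's seen set
def Cpl (G : List (List Int)) (vis : List Bool) (seen : PySem.Set Nat) : Prop :=
  vis.length = G.length ∧ (∀ i, i ∈ seen ↔ vis.getD i false = true) ∧
  seen.Nodup ∧ ∀ x ∈ seen, x < G.length

-- A's order array as a function of the postorder sequence
def ordAux : List Int → Int → List Nat → List Int
  | o, _, [] => o
  | o, t, u :: rest => ordAux (o.set u t) (t+1) rest

-- A's processing of one resumption frame (u, j): run the neighbour loop from index j,
-- then record u's finishing time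
def Astep (G : List (List Int)) (s : List Bool × List Int × Int) (u j : Nat) : List Bool × List Int × Int :=
  let s2 := (List.range' j (G.length - j)).foldl
    (fun t v => if (G.getD u []).getD v 0 = 1 ∧ t.1.getD v false = false then dfsA G G.length t v else t) s
  (s2.1, s2.2.1.set u s2.2.2, s2.2.2 + 1)

-- step bound for B's stack machine
def Mm (G : List (List Int)) (seen : PySem.Set Nat) (k : List (Nat × Nat)) : Nat :=
  k.length + 2 * (G.length - seen.length)

theorem getD_set_self_bool (a : List Bool) (u : Nat) (x d : Bool) (h : u < a.length) :
    (a.set u x).getD u d = x := by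
  simp [List.getD_eq_getElem?_getD, h]

theorem getD_set_ne_bool (a : List Bool) (u i : Nat) (x d : Bool) (h : i ≠ u) :
    (a.set u x).getD i d = a.getD i d := by
  simp [List.getD_eq_getElem?_getD, List.getElem?_set_ne (Ne.symm h)]

theorem Vle_refl (a : List Bool) : Vle a a := ⟨rfl, fun _ h => h⟩

theorem Vle_trans {a b c : List Bool} (h1 : Vle a b) (h2 : Vle b c) : Vle a c :=
  ⟨h1.1.trans h2.1, fun i h => h2.2 i (h1.2 i h)⟩

theorem Vle_set_true (a : List Bool) (u : Nat) : Vle a (a.set u true) := by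
  refine ⟨(List.length_set ..).symm, fun i h => ?_⟩
  by_cases hiu : i = u
  · subst hiu
    by_cases hlt : i < a.length
    · exact getD_set_self_bool a i true false hlt
    · rw [List.getD_eq_default _ _ (by omega)] at h; exact absurd h (by simp)
  · rwa [getD_set_ne_bool a u i true false hiu]

theorem cF_anti : ∀ (a b : List Bool), Vle a b → cF b ≤ cF a := by
  intro a
  induction a with
  | nil => intro b h; have : b = [] := List.eq_nil_of_length_eq_zero h.1.symm; simp [this]
  | cons x as ih =>
    intro b h
    obtain ⟨y, bs, rfl⟩ : ∃ y bs, b = y :: bs := by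
      cases b with
      | nil => exact absurd h.1 (by simp)
      | cons y bs => exact ⟨y, bs, rfl⟩
    have htail : Vle as bs := by
      refine ⟨by simpa using h.1, fun i hi => ?_⟩
      have := h.2 (i + 1)
      simpa [List.getD_cons_succ] using this (by simpa [List.getD_cons_succ] using hi)
    have hh := h.2 0
    simp only [List.getD_cons_zero] at hh
    have := ih bs htail
    unfold cF at *
    cases x with
    | true =>
      have hy : y = true := hh rfl
      subst hy
      simpa [List.count_cons] using this
    | false =>
      have h1 : List.count false (y :: bs) ≤ List.count false bs + 1 := by
        cases y <;> simp
      have h2 : List.count false (false :: as) = List.count false as + 1 := by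
        simp
      omega

theorem cF_set : ∀ (a : List Bool) (u : Nat), u < a.length → a.getD u false = false →
    cF (a.set u true) + 1 = cF a := by
  intro a
  induction a with
  | nil => intro u h; simp at h
  | cons x as ih =>
    intro u hu hx
    cases u with
    | zero =>
      simp only [List.getD_cons_zero] at hx
      subst hx
      simp [cF]
    | succ u =>
      simp only [List.getD_cons_succ] at hx
      have := ih u (by simpa using hu) hx
      simp only [List.set_cons_succ]
      unfold cF at *
      simp only [List.count_cons] at *
      omega

theorem cF_le_len (a : List Bool) : cF a ≤ a.length := List.count_le_length


theorem nodup_len_le (l : List Nat) (n : Nat) (h : l.Nodup) (hb : ∀ x ∈ l, x < n) :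
    l.length ≤ n := by
  have hsub : l ⊆ List.range n := fun x hx => List.mem_range.mpr (hb x hx)
  have := (h.subperm hsub).length_le
  simpa using this

theorem runB_nil (G : List (List Int)) (f : Nat) (s : PySem.Set Nat × List Nat) :
    runB G f s [] = s := by
  cases f <;> rfl

theorem runB_step_found (G : List (List Int)) (f : Nat) (s : PySem.Set Nat × List Nat)
    (u j : Nat) (k : List (Nat × Nat)) (h : scanB G s.1 u (G.length - j) j < G.length) :
    runB G (f+1) s ((u,j)::k)
      = runB G f (PySem.Set.add s.1 (scanB G s.1 u (G.length - j) j), s.2)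
          ((scanB G s.1 u (G.length - j) j, 0) :: (u, scanB G s.1 u (G.length - j) j + 1) :: k) := by
  simp [runB, h]

theorem runB_step_finish (G : List (List Int)) (f : Nat) (s : PySem.Set Nat × List Nat)
    (u j : Nat) (k : List (Nat × Nat)) (h : ¬ scanB G s.1 u (G.length - j) j < G.length) :
    runB G (f+1) s ((u,j)::k) = runB G f (s.1, s.2 ++ [u]) k := by
  simp [runB, h]

-- characterisation of Source B's inner while loop
theorem scan_spec (G : List (List Int)) (seen : PySem.Set Nat) (u : Nat) :
    ∀ f j, G.length ≤ f + j → j ≤ G.length →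
      j ≤ scanB G seen u f j ∧ scanB G seen u f j ≤ G.length ∧
      (∀ v, j ≤ v → v < scanB G seen u f j → ¬((G.getD u []).getD v 0 = 1 ∧ v ∉ seen)) ∧
      (scanB G seen u f j < G.length →
        (G.getD u []).getD (scanB G seen u f j) 0 = 1 ∧ scanB G seen u f j ∉ seen) := by
  intro f
  induction f with
  | zero =>
    intro j hfj hj
    have hj' : j = G.length := by omega
    simp only [scanB]
    refine ⟨le_rfl, hj, fun v hv1 hv2 => by omega, fun h => by omega⟩
  | succ f ih =>
    intro j hfj hj
    simp only [scanB]
    by_cases hc : j < G.length ∧ ¬((G.getD u []).getD j 0 = 1 ∧ j ∉ seen)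
    · rw [if_pos hc]
      obtain ⟨h1, h2, h3, h4⟩ := ih (j+1) (by omega) (by omega)
      refine ⟨by omega, h2, fun v hv1 hv2 => ?_, h4⟩
      rcases Nat.eq_or_lt_of_le hv1 with rfl | hlt
      · exact hc.2
      · exact h3 v hlt hv2
    · rw [if_neg hc]
      refine ⟨le_rfl, hj, fun v hv1 hv2 => by omega, fun hjn => ?_⟩
      rcases not_and_or.mp hc with h | h
      · omega
      · simpa using h

-- ordAux and the output assembly
theorem ordAux_append (v : Nat) : ∀ (l : List Nat) (o : List Int) (t : Int),
    ordAux o t (l ++ [v]) = (ordAux o t l).set v (t + l.length) := by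
  intro l
  induction l with
  | nil => intro o t; simp [ordAux]
  | cons u rest ih =>
    intro o t
    simp only [List.cons_append, ordAux, ih]
    congr 1
    simp only [List.length_cons]
    push_cast
    ring

theorem map_range_update {a : Int} (n v : Nat) (f : Nat → Int) (hv : v < n) :
    (List.range n).map (fun u => if u = v then a else f u) = ((List.range n).map f).set v a := by
  apply List.ext_getElem
  · simp
  · intro i h1 h2
    have hi : i < n := by simpa using h1
    rw [List.getElem_map, List.getElem_set]
    simp only [List.getElem_range]
    by_cases hiv : i = v
    · subst hiv; simp
    · rw [if_neg hiv, if_neg (fun h => hiv h.symm), List.getElem_map, List.getElem_range]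

theorem final_assembly (n : Nat) : ∀ (post : List Nat), (∀ x ∈ post, x < n) →
    (List.range n).map (fun u =>
        ((PySem.List.enumerate post).foldl (fun d p => d.insert p.2 p.1) PySem.Dict.empty).getD u (-1))
      = ordAux (List.replicate n (-1)) 0 post := by
  intro post
  induction post using List.reverseRecOn with
  | nil =>
    intro _
    simp only [PySem.List.enumerate_nil, List.foldl_nil, PySem.Dict.getD_empty, ordAux]
    apply List.ext_getElem
    · simp
    · intro i h1 h2
      simp
  | append_singleton post v ih =>
    intro hb
    have hv : v < n := hb v (by simp)
    rw [PySem.List.enumerate_append, List.foldl_append]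
    simp only [PySem.List.enumerate_cons, PySem.List.enumerate_nil, List.foldl_cons, List.foldl_nil]
    have hmap : ∀ u ∈ List.range n,
        (((PySem.List.enumerate post).foldl (fun d p => d.insert p.2 p.1) PySem.Dict.empty).insert v (0 + (post.length : Int))).getD u (-1)
          = if u = v then ((0 : Int) + (post.length : Int))
            else ((PySem.List.enumerate post).foldl (fun d p => d.insert p.2 p.1) PySem.Dict.empty).getD u (-1) := by
      intro u _
      exact PySem.Dict.getD_insert _ _ _ _ _
    rw [List.map_congr_left hmap, map_range_update n v _ hv,
      ih (fun x hx => hb x (by simp [hx])), ordAux_append]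

-- A's inner neighbour loop: fuel-irrelevance and monotonicity, given the same facts
-- for recursive dfsA calls at strictly fewer unvisited nodes (the IH of dfsA_spec)
theorem foldA_spec (G : List (List Int)) (r : List Int) (c : Nat)
    (IH : ∀ c' < c, ∀ (s : List Bool × List Int × Int) (u f g : Nat),
      cF s.1 ≤ c' → s.1.length = G.length → u < G.length → s.1.getD u false = false →
      cF s.1 ≤ f → cF s.1 ≤ g →
      dfsA G f s u = dfsA G g s u ∧ Vle (s.1.set u true) (dfsA G f s u).1) :
    ∀ (vs : List Nat) (s : List Bool × List Int × Int) (f g : Nat),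
      (∀ v ∈ vs, v < G.length) → cF s.1 < c → s.1.length = G.length → cF s.1 ≤ f → cF s.1 ≤ g →
      (vs.foldl (fun t v => if r.getD v 0 = 1 ∧ t.1.getD v false = false then dfsA G f t v else t) s)
        = (vs.foldl (fun t v => if r.getD v 0 = 1 ∧ t.1.getD v false = false then dfsA G g t v else t) s)
      ∧ Vle s.1 ((vs.foldl (fun t v => if r.getD v 0 = 1 ∧ t.1.getD v false = false then dfsA G f t v else t) s)).1 := by
  intro vs
  induction vs with
  | nil => intro s f g _ _ _ _ _; exact ⟨rfl, Vle_refl s.1⟩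
  | cons v vs ih =>
    intro s f g hvs hc hlen hf hg
    simp only [List.foldl_cons]
    by_cases hcond : r.getD v 0 = 1 ∧ s.1.getD v false = false
    · rw [if_pos hcond, if_pos hcond]
      have hv : v < G.length := hvs v (by simp)
      obtain ⟨heq, hvle⟩ := IH (cF s.1) hc s v f g le_rfl hlen hv hcond.2 hf hg
      have hvle1 : Vle s.1 (dfsA G f s v).1 := Vle_trans (Vle_set_true s.1 v) hvle
      have hlen2 : (dfsA G f s v).1.length = G.length := by rw [← hvle1.1]; exact hlen
      have hcf2 : cF (dfsA G f s v).1 + 1 ≤ cF s.1 := by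
        have h1 := cF_anti _ _ hvle
        have h2 := cF_set s.1 v (by rw [hlen]; exact hv) hcond.2
        omega
      obtain ⟨heq2, hvle2⟩ := ih (dfsA G f s v) f g (fun w hw => hvs w (by simp [hw]))
        (by omega) hlen2 (by omega) (by omega)
      refine ⟨?_, Vle_trans hvle1 hvle2⟩
      rw [← heq]
      exact heq2
    · rw [if_neg hcond, if_neg hcond]
      exact ih s f g (fun w hw => hvs w (by simp [hw])) hc hlen hf hg

-- dfsA: fuel-irrelevance (any fuel ≥ #unvisited) and monotonicity of `visited`
theorem dfsA_spec (G : List (List Int)) :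
    ∀ c (s : List Bool × List Int × Int) (u : Nat) (f g : Nat),
      cF s.1 ≤ c → s.1.length = G.length → u < G.length → s.1.getD u false = false →
      cF s.1 ≤ f → cF s.1 ≤ g →
      dfsA G f s u = dfsA G g s u ∧ Vle (s.1.set u true) (dfsA G f s u).1 := by
  intro c
  induction c using Nat.strong_induction_on with
  | _ c IH =>
    intro s u f g hc hlen hu hunvis hf hg
    have hcset : cF (s.1.set u true) + 1 = cF s.1 := cF_set s.1 u (by rw [hlen]; exact hu) hunvis
    obtain ⟨f', rfl⟩ : ∃ f', f = f' + 1 := ⟨f - 1, by omega⟩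
    obtain ⟨g', rfl⟩ : ∃ g', g = g' + 1 := ⟨g - 1, by omega⟩
    simp only [dfsA]
    have hlen1 : ((s.1.set u true, s.2.1, s.2.2) : List Bool × List Int × Int).1.length = G.length := by
      simpa using hlen
    have hfold := foldA_spec G (G.getD u []) c IH (List.range G.length)
      (s.1.set u true, s.2.1, s.2.2) f' g'
      (fun v hv => List.mem_range.mp hv) (by simp only []; omega) hlen1
      (by simp only []; omega) (by simp only []; omega)
    exact ⟨by rw [hfold.1], hfold.2⟩

theorem foldA_skip (G : List (List Int)) (row : List Int) :
    ∀ (d j : Nat) (s : List Bool × List Int × Int), j + d ≤ G.length →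
      (∀ v, j ≤ v → v < j + d → ¬(row.getD v 0 = 1 ∧ s.1.getD v false = false)) →
      (List.range' j (G.length - j)).foldl
          (fun t v => if row.getD v 0 = 1 ∧ t.1.getD v false = false then dfsA G G.length t v else t) s
        = (List.range' (j+d) (G.length - (j+d))).foldl
            (fun t v => if row.getD v 0 = 1 ∧ t.1.getD v false = false then dfsA G G.length t v else t) s := by
  intro d
  induction d with
  | zero => intro j s _ _; rfl
  | succ d ih =>
    intro j s hjd hskip
    have hj : j < G.length := by omega
    have hsplit : G.length - j = (G.length - (j+1)) + 1 := by omega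
    rw [hsplit, List.range'_succ, List.foldl_cons,
      if_neg (hskip j le_rfl (by omega))]
    have := ih (j+1) s (by omega) (fun v hv1 hv2 => hskip v (by omega) (by omega))
    rw [this, show j+1+d = j+(d+1) from by omega]

-- entering an unvisited node: dfsA as a frame step at index 0
theorem dfsA_eq_Astep (G : List (List Int)) (s : List Bool × List Int × Int) (v : Nat)
    (hv : v < G.length) (hlen : s.1.length = G.length) (hunvis : s.1.getD v false = false) :
    dfsA G G.length s v = Astep G (s.1.set v true, s.2.1, s.2.2) v 0 := by
  obtain ⟨m, hm⟩ : ∃ m, G.length = m + 1 := ⟨G.length - 1, by omega⟩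
  have hcset : cF (s.1.set v true) + 1 = cF s.1 := cF_set s.1 v (by omega) hunvis
  have hcF : cF s.1 ≤ G.length := hlen ▸ cF_le_len s.1
  conv_lhs => rw [hm]
  simp only [dfsA]
  unfold Astep
  have hlen1 : ((s.1.set v true, s.2.1, s.2.2) : List Bool × List Int × Int).1.length = G.length := by
    simpa using hlen
  have hfold := foldA_spec G (G.getD v []) (cF (s.1.set v true) + 1)
    (fun c' _ s u f g hc hl hu hun hf hg => dfsA_spec G c' s u f g hc hl hu hun hf hg)
    (List.range G.length) (s.1.set v true, s.2.1, s.2.2) m G.length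
    (fun w hw => List.mem_range.mp hw) (by simp only []; omega) hlen1
    (by simp only []; omega) (by simp only []; omega)
  rw [show (List.range' 0 (G.length - 0)) = List.range G.length by
    rw [Nat.sub_zero, List.range_eq_range']]
  rw [hfold.1]

theorem Astep_decomp (G : List (List Int)) (s : List Bool × List Int × Int) (u j j' : Nat)
    (hjj : j ≤ j') (hj'n : j' < G.length)
    (hskip : ∀ v, j ≤ v → v < j' → ¬((G.getD u []).getD v 0 = 1 ∧ s.1.getD v false = false))
    (hcond : (G.getD u []).getD j' 0 = 1 ∧ s.1.getD j' false = false) :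
    Astep G s u j = Astep G (dfsA G G.length s j') u (j'+1) := by
  unfold Astep
  rw [foldA_skip G (G.getD u []) (j' - j) j s (by omega) (by
    intro v hv1 hv2
    exact hskip v hv1 (by omega))]
  rw [show j + (j' - j) = j' from by omega]
  rw [show G.length - j' = (G.length - (j'+1)) + 1 from by omega, List.range'_succ,
    List.foldl_cons, if_pos hcond]

theorem Astep_finish (G : List (List Int)) (s : List Bool × List Int × Int) (u j : Nat)
    (hj : j ≤ G.length)
    (hskip : ∀ v, j ≤ v → v < G.length → ¬((G.getD u []).getD v 0 = 1 ∧ s.1.getD v false = false)) :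
    Astep G s u j = (s.1, s.2.1.set u s.2.2, s.2.2 + 1) := by
  unfold Astep
  rw [foldA_skip G (G.getD u []) (G.length - j) j s (by omega) (by
    intro v hv1 hv2
    exact hskip v hv1 (by omega))]
  rw [show j + (G.length - j) = G.length from by omega]
  simp

-- B's machine: fuel-irrelevance for any fuel ≥ the step bound Mm
theorem runB_eq (G : List (List Int)) :
    ∀ m (seen : PySem.Set Nat) (post : List Nat) (k : List (Nat × Nat)) (f g : Nat),
      seen.Nodup → (∀ x ∈ seen, x < G.length) →
      Mm G seen k ≤ m → Mm G seen k ≤ f → Mm G seen k ≤ g →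
      runB G f (seen, post) k = runB G g (seen, post) k := by
  intro m
  induction m using Nat.strong_induction_on with
  | _ m IH =>
    intro seen post k f g hnd hb hm hf hg
    match k with
    | [] => rw [runB_nil, runB_nil]
    | (u, j) :: k =>
      have hM1 : 1 ≤ Mm G seen ((u,j)::k) := by simp [Mm]; omega
      obtain ⟨f', rfl⟩ : ∃ f', f = f' + 1 := ⟨f - 1, by omega⟩
      obtain ⟨g', rfl⟩ : ∃ g', g = g' + 1 := ⟨g - 1, by omega⟩
      by_cases hlt : scanB G seen u (G.length - j) j < G.length
      · have hj : j ≤ G.length := by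
          by_contra h
          have h0 : G.length - j = 0 := by omega
          rw [h0] at hlt
          simp only [scanB] at hlt
          omega
        have hs := scan_spec G seen u (G.length - j) j (by omega) hj
        obtain ⟨hedge, hnotmem⟩ := hs.2.2.2 hlt
        have hadd : PySem.Set.add seen (scanB G seen u (G.length - j) j)
            = seen ++ [scanB G seen u (G.length - j) j] :=
          PySem.Set.add_of_not_mem hnotmem
        have hnd' : (seen ++ [scanB G seen u (G.length - j) j]).Nodup := by
          rw [List.nodup_append]
          refine ⟨hnd, List.nodup_singleton _, fun a ha b hbm => ?_⟩
          rw [List.mem_singleton] at hbm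
          exact fun hab => hnotmem ((hab.trans hbm) ▸ ha)
        have hb' : ∀ x ∈ seen ++ [scanB G seen u (G.length - j) j], x < G.length := by
          intro x hx
          rcases List.mem_append.mp hx with hx | hx
          · exact hb x hx
          · simp at hx; omega
        have hlenlt : seen.length < G.length := by
          have := nodup_len_le _ G.length hnd' hb'
          simp at this
          omega
        rw [runB_step_found G f' (seen, post) u j k hlt,
          runB_step_found G g' (seen, post) u j k hlt]
        simp only [hadd]
        apply IH (m - 1) (by omega) _ post _ f' g' hnd' hb'
        all_goals
          simp only [Mm, List.length_append, List.length_cons] at hm hf hg ⊢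
          omega
      · rw [runB_step_finish G f' (seen, post) u j k hlt,
          runB_step_finish G g' (seen, post) u j k hlt]
        apply IH (m - 1) (by omega) seen _ k f' g' hnd hb
        all_goals
          simp only [Mm, List.length_cons] at hm hf hg ⊢
          omega

-- the simulation: popping frame (u, j) (u marked) runs A's neighbour loop from j and
-- finishes u, with coupled visited/seen and order/time determined by the postorder list
theorem master (G : List (List Int)) :
    ∀ c (vis : List Bool) (o : List Int) (ti : Int) (seen : PySem.Set Nat) (post : List Nat)
      (u j : Nat) (k : List (Nat × Nat)) (f : Nat),
      Cpl G vis seen → cF vis ≤ c → u < G.length → vis.getD u false = true → j ≤ G.length →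
      Mm G seen ((u,j)::k) ≤ f →
      o = ordAux (List.replicate G.length (-1)) 0 post → ti = (post.length : Int) →
      (∀ x ∈ post, x < G.length) →
      ∃ seen2 post2,
        runB G f (seen, post) ((u,j)::k) = runB G f (seen2, post2) k ∧
        Cpl G (Astep G (vis,o,ti) u j).1 seen2 ∧
        (Astep G (vis,o,ti) u j).2.1 = ordAux (List.replicate G.length (-1)) 0 post2 ∧
        (Astep G (vis,o,ti) u j).2.2 = (post2.length : Int) ∧
        (∀ x ∈ post2, x < G.length) ∧
        Vle vis (Astep G (vis,o,ti) u j).1 ∧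
        seen.length ≤ seen2.length := by
  intro c
  induction c using Nat.strong_induction_on with
  | _ c IHm =>
    intro vis o ti seen post u j k f hC hc hu hmark hj hf ho hti hpost
    obtain ⟨hlenv, hmem, hnd, hbnd⟩ := hC
    have hM1 : 1 ≤ Mm G seen ((u,j)::k) := by simp [Mm]; omega
    obtain ⟨f', rfl⟩ : ∃ f', f = f' + 1 := ⟨f - 1, by omega⟩
    have hs := scan_spec G seen u (G.length - j) j (by omega) hj
    by_cases hlt : scanB G seen u (G.length - j) j < G.length
    · -- the scan found an unvisited neighbour j'
      obtain ⟨hedge, hnotmem⟩ := hs.2.2.2 hlt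
      set j' := scanB G seen u (G.length - j) j with hj'def
      have hvisj' : vis.getD j' false = false := by
        cases hvb : vis.getD j' false with
        | false => rfl
        | true => exact absurd ((hmem j').mpr hvb) hnotmem
      have hskipA : ∀ v, j ≤ v → v < j' → ¬((G.getD u []).getD v 0 = 1 ∧ vis.getD v false = false) := by
        rintro v h1 h2 ⟨e, hv⟩
        exact hs.2.2.1 v h1 h2 ⟨e, fun hm' => by rw [(hmem v).mp hm'] at hv; cases hv⟩
      have hd1 := Astep_decomp G (vis,o,ti) u j j' hs.1 hlt hskipA ⟨hedge, hvisj'⟩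
      have hd2 := dfsA_eq_Astep G (vis,o,ti) j' hlt hlenv hvisj'
      have hadd : PySem.Set.add seen j' = seen ++ [j'] := PySem.Set.add_of_not_mem hnotmem
      have hcset : cF (vis.set j' true) + 1 = cF vis :=
        cF_set vis j' (by omega) hvisj'
      have hnd' : (seen ++ [j']).Nodup := by
        rw [List.nodup_append]
        refine ⟨hnd, List.nodup_singleton _, fun a ha b hbm => ?_⟩
        rw [List.mem_singleton] at hbm
        exact fun hab => hnotmem ((hab.trans hbm) ▸ ha)
      have hbnd' : ∀ x ∈ seen ++ [j'], x < G.length := by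
        intro x hx
        rcases List.mem_append.mp hx with hx | hx
        · exact hbnd x hx
        · rw [List.mem_singleton] at hx; omega
      have hlenlt : seen.length < G.length := by
        have := nodup_len_le _ G.length hnd' hbnd'
        simp at this
        omega
      have hC' : Cpl G (vis.set j' true) (seen ++ [j']) := by
        refine ⟨by simpa using hlenv, fun i => ?_, hnd', hbnd'⟩
        by_cases hij : i = j'
        · rw [hij, getD_set_self_bool vis j' true false (by omega)]
          simp
        · rw [getD_set_ne_bool vis j' i true false hij]
          rw [List.mem_append, List.mem_singleton]
          simp only [hij, or_false]
          exact hmem i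
      obtain ⟨seen2, post2, heq1, hC2, hord2, hti2, hpost2, hVle2, hlen2⟩ :=
        IHm (c-1) (by omega) (vis.set j' true) o ti (seen ++ [j']) post j' 0 ((u, j'+1)::k) f'
          hC' (by omega) hlt (getD_set_self_bool vis j' true false (by omega)) (by omega)
          (by simp only [Mm, List.length_append, List.length_cons] at hf ⊢; omega)
          ho hti hpost
      rw [← hd2] at hC2 hord2 hti2 hVle2
      have hVs : Vle vis (dfsA G G.length (vis,o,ti) j').1 :=
        Vle_trans (Vle_set_true vis j') hVle2
      have hcS2 : cF (dfsA G G.length (vis,o,ti) j').1 ≤ cF vis - 1 := by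
        have := cF_anti _ _ hVle2
        omega
      have hmarkS2 : (dfsA G G.length (vis,o,ti) j').1.getD u false = true := hVs.2 u hmark
      obtain ⟨seen3, post3, heq3, hC3, hord3, hti3, hpost3, hVle3, hlen3⟩ :=
        IHm (c-1) (by omega) (dfsA G G.length (vis,o,ti) j').1
          (dfsA G G.length (vis,o,ti) j').2.1 (dfsA G G.length (vis,o,ti) j').2.2
          seen2 post2 u (j'+1) k f'
          hC2 (by omega) hu hmarkS2 (by omega)
          (by
            simp only [Mm, List.length_append, List.length_cons] at hf hlen2 ⊢
            omega)
          hord2 hti2 hpost2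
      refine ⟨seen3, post3, ?_, ?_, ?_, ?_, hpost3, ?_, ?_⟩
      · rw [runB_step_found G f' (seen,post) u j k hlt]
        rw [← hj'def, hadd, heq1, heq3]
        apply runB_eq G (Mm G seen3 k) seen3 post3 k f' (f'+1) hC3.2.2.1 hC3.2.2.2
        all_goals
          simp only [Mm, List.length_append, List.length_cons] at hf hlen2 hlen3 ⊢
          omega
      · rw [hd1]; exact hC3
      · rw [hd1]; exact hord3
      · rw [hd1]; exact hti3
      · rw [hd1]; exact Vle_trans hVs hVle3
      · simp only [List.length_append, List.length_cons] at hlen2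
        omega
    · -- the scan exhausted the row: u finishes
      have hj'top : scanB G seen u (G.length - j) j = G.length := by omega
      have hskipA : ∀ v, j ≤ v → v < G.length → ¬((G.getD u []).getD v 0 = 1 ∧ vis.getD v false = false) := by
        rintro v h1 h2 ⟨e, hv⟩
        exact hs.2.2.1 v h1 (by omega) ⟨e, fun hm' => by rw [(hmem v).mp hm'] at hv; cases hv⟩
      have hA := Astep_finish G (vis,o,ti) u j hj hskipA
      refine ⟨seen, post ++ [u], ?_, ?_, ?_, ?_, ?_, ?_, le_rfl⟩
      · rw [runB_step_finish G f' (seen,post) u j k hlt]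
        apply runB_eq G (Mm G seen k) seen (post ++ [u]) k f' (f'+1) hnd hbnd
        all_goals
          simp only [Mm, List.length_cons] at hf ⊢
          omega
      · rw [hA]; exact ⟨hlenv, hmem, hnd, hbnd⟩
      · rw [hA, ho, hti, ordAux_append]
        simp
      · rw [hA, hti]
        simp only [List.length_append, List.length_cons, List.length_nil]
        push_cast
        ring
      · intro x hx
        rcases List.mem_append.mp hx with hx | hx
        · exact hpost x hx
        · rw [List.mem_singleton] at hx; omega
      · rw [hA]; exact Vle_refl vis

-- the outer root loops agree, root by root
theorem top_fold (G : List (List Int)) :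
    ∀ (roots : List Nat) (vis : List Bool) (o : List Int) (ti : Int)
      (seen : PySem.Set Nat) (post : List Nat),
      (∀ i ∈ roots, i < G.length) → Cpl G vis seen →
      o = ordAux (List.replicate G.length (-1)) 0 post → ti = (post.length : Int) →
      (∀ x ∈ post, x < G.length) →
      (roots.foldl (fun s i => if s.1.getD i false = false then dfsA G G.length s i else s) (vis,o,ti)).2.1
        = ordAux (List.replicate G.length (-1)) 0
            (roots.foldl (fun s root =>
              if root ∈ s.1 then s
              else runB G ((G.length + 1) * (G.length + 1)) (PySem.Set.add s.1 root, s.2) [(root, 0)]) (seen,post)).2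
      ∧ (∀ x ∈ (roots.foldl (fun s root =>
              if root ∈ s.1 then s
              else runB G ((G.length + 1) * (G.length + 1)) (PySem.Set.add s.1 root, s.2) [(root, 0)]) (seen,post)).2,
          x < G.length) := by
  intro roots
  induction roots with
  | nil =>
    intro vis o ti seen post _ hC ho hti hp
    simp only [List.foldl_nil]
    exact ⟨ho, hp⟩
  | cons i roots ih =>
    intro vis o ti seen post hroots hC ho hti hp
    obtain ⟨hlenv, hmem, hnd, hbnd⟩ := hC
    have hi : i < G.length := hroots i (by simp)
    simp only [List.foldl_cons]
    by_cases hvis : vis.getD i false = false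
    · rw [if_pos hvis]
      have hnotmem : i ∉ seen := fun hm' => by rw [(hmem i).mp hm'] at hvis; cases hvis
      rw [if_neg hnotmem]
      have hadd : PySem.Set.add seen i = seen ++ [i] := PySem.Set.add_of_not_mem hnotmem
      have hnd' : (seen ++ [i]).Nodup := by
        rw [List.nodup_append]
        refine ⟨hnd, List.nodup_singleton _, fun a ha b hbm => ?_⟩
        rw [List.mem_singleton] at hbm
        exact fun hab => hnotmem ((hab.trans hbm) ▸ ha)
      have hbnd' : ∀ x ∈ seen ++ [i], x < G.length := by
        intro x hx
        rcases List.mem_append.mp hx with hx | hx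
        · exact hbnd x hx
        · rw [List.mem_singleton] at hx; omega
      have hC' : Cpl G (vis.set i true) (seen ++ [i]) := by
        refine ⟨by simpa using hlenv, fun w => ?_, hnd', hbnd'⟩
        by_cases hwi : w = i
        · rw [hwi, getD_set_self_bool vis i true false (by omega)]
          simp
        · rw [getD_set_ne_bool vis i w true false hwi]
          rw [List.mem_append, List.mem_singleton]
          simp only [hwi, or_false]
          exact hmem w
      have hlen1 : (seen ++ [i]).length ≤ G.length := nodup_len_le _ G.length hnd' hbnd'
      have hMm : Mm G (seen ++ [i]) [(i,0)] ≤ (G.length + 1) * (G.length + 1) := by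
        have h2 : Mm G (seen ++ [i]) [(i,0)] ≤ 2 * G.length + 1 := by
          simp only [Mm, List.length_cons, List.length_nil]
          omega
        nlinarith
      obtain ⟨seen2, post2, heq, hC2, hord2, hti2, hpost2, hVle2, hlen2⟩ :=
        master G (cF (vis.set i true)) (vis.set i true) o ti (seen ++ [i]) post i 0 []
          ((G.length + 1) * (G.length + 1)) hC' le_rfl hi
          (getD_set_self_bool vis i true false (by omega)) (by omega) hMm ho hti hp
      rw [runB_nil] at heq
      have hd := dfsA_eq_Astep G (vis,o,ti) i hi hlenv hvis
      rw [← hd] at hC2 hord2 hti2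
      rw [hadd, heq]
      exact ih (dfsA G G.length (vis,o,ti) i).1 (dfsA G G.length (vis,o,ti) i).2.1
        (dfsA G G.length (vis,o,ti) i).2.2 seen2 post2
        (fun w hw => hroots w (by simp [hw])) hC2 hord2 hti2 hpost2
    · rw [if_neg hvis]
      have hmemi : i ∈ seen := (hmem i).mpr (by cases hvb : vis.getD i false with
        | true => rfl
        | false => exact absurd hvb hvis)
      rw [if_pos hmemi]
      exact ih vis o ti seen post (fun w hw => hroots w (by simp [hw]))
        ⟨hlenv, hmem, hnd, hbnd⟩ ho hti hp

-- ===== VERDICT (by name: the statement is the Claim_ definition above) =====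
theorem keep_connected_spec : Claim_equal_keep_connected := by
  intro G _ _
  simp only [Spec_keep_connected, keep_connected, keep_connected_alt]
  have h0 : Cpl G (List.replicate G.length false) PySem.Set.empty := by
    refine ⟨by simp, fun i => ?_, List.nodup_nil, by simp [PySem.Set.empty]⟩
    simp [PySem.Set.empty]
  have htop := top_fold G (List.range G.length) (List.replicate G.length false)
    (List.replicate G.length (-1)) 0 PySem.Set.empty []
    (fun i hi => List.mem_range.mp hi) h0 rfl (by simp) (by simp)
  rw [htop.1]
  exact (final_assembly G.length _ htop.2).symm
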